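-- pv_equiv track=rewrite | github.com/jumpingtom1/legal-research-plugin | scripts/vq_matcher.py | find_token_subsequence
-- ===== SOURCE A (Python) =====
-- def find_token_subsequence(haystack_tokens, needle_tokens):
--     """Find needle tokens as contiguous subsequence in haystack. Return start index or -1."""
--     if not needle_tokens:
--         return 0
--     n = len(needle_tokens)
--     for i in range(len(haystack_tokens) - n + 1):
--         if haystack_tokens[i : i + n] == needle_tokens:
--             return i
--     return -1
-- ===== SOURCE B (Python) =====
-- def _longest_border(needle, j, cap):
--     # longest k <= cap with needle[:k] == needle[j-k:j]; 0 if none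
--     for k in range(cap, 0, -1):
--         if needle[:k] == needle[j - k:j]:
--             return k
--     return 0
--
--
-- def find_token_subsequence(haystack_tokens, needle_tokens):
--     """Find needle tokens as contiguous subsequence in haystack. Return start index or -1."""
--     if not needle_tokens:
--         return 0
--     m = len(needle_tokens)
--     # failure table: fail[j-1] = longest proper border of needle_tokens[:j];
--     # the border of the j-prefix is at most (border of the (j-1)-prefix) + 1,
--     # so the search may start at min(j - 1, prev + 1).
--     fail = []
--     prev = 0
--     for j in range(1, m + 1):
--         prev = _longest_border(needle_tokens, j, min(j - 1, prev + 1))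
--         fail.append(prev)
--     # single left-to-right scan (Morris-Pratt matching)
--     j = 0
--     for idx, tok in enumerate(haystack_tokens):
--         while j > 0 and tok != needle_tokens[j]:
--             j = fail[j - 1]
--         if tok == needle_tokens[j]:
--             j += 1
--         if j == m:
--             return idx - m + 1
--     return -1
-- ===== Notes on version B (the rewrite author's own statement) =====
-- stated objective: alternative
-- what changed: Replaces A's slice-comparison at every start index with Morris-Pratt matching: a precomputed border (failure) table over the needle and a single left-to-right scan of the haystack that never re-reads matched tokens.
import Mathlib
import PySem

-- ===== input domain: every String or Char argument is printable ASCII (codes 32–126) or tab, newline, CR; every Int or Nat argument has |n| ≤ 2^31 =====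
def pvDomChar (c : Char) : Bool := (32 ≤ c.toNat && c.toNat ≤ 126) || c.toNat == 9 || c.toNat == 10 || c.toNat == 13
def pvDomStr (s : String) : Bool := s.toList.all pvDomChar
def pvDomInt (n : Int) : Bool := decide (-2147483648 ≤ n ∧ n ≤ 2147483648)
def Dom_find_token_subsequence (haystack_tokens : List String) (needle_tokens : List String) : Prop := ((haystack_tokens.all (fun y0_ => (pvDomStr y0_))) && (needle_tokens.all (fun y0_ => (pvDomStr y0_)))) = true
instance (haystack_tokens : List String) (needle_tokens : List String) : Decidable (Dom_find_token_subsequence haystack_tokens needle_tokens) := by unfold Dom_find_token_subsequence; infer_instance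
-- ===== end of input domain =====

-- B is the Morris–Pratt scan with a border table: a single pass over the haystack
-- instead of A's slice comparison at every start index (objective: alternative).

-- ===== PORT A =====
-- the `for i in range(...)` loop with its early return
def goA (h n : List String) : List Int → Int
  | [] => -1
  | i :: rest =>
      if PySem.List.slice h (some i) (some (i + (n.length : Int))) = n then i
      else goA h n rest

def find_token_subsequence (haystack_tokens : List String) (needle_tokens : List String) : Int :=
  if needle_tokens = [] then 0
  else goA haystack_tokens needle_tokens
        (PySem.List.pyRange 0 ((haystack_tokens.length : Int) - (needle_tokens.length : Int) + 1) 1)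

-- ===== PORT B =====
-- `for k in range(cap, 0, -1)` as the descending list [cap, cap-1, …, 1]
def descList (s : Nat) : List Nat := (List.range s).map (fun t => s - t)

-- body of _longest_border: first k in the descending list with needle[:k] == needle[j-k:j]
-- (slices are exact here: 0 ≤ k ≤ j, so needle[:k] = take k, needle[j-k:j] = (drop (j-k)).take k)
def borderLoop (needle : List String) (j : Nat) : List Nat → Nat
  | [] => 0
  | k :: rest =>
      if needle.take k = (needle.drop (j - k)).take k then k
      else borderLoop needle j rest

-- _longest_border(needle, j, min(j-1, prev+1))
def borderB (needle : List String) (j prev : Nat) : Nat :=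
  borderLoop needle j (descList (min (j - 1) (prev + 1)))

-- the `for j in range(1, m+1)` loop building `fail` (c = iterations left)
def buildFail (needle : List String) : Nat → Nat → Nat → List Nat
  | _, _, 0 => []
  | prev, j, c + 1 =>
      let b := borderB needle j prev
      b :: buildFail needle b (j + 1) c

def failTable (needle : List String) : List Nat :=
  buildFail needle 0 1 needle.length

-- `while j > 0 and tok != needle[j]: j = fail[j-1]` — fuel-bounded (fail values strictly
-- decrease, so fuel = initial j suffices; the guards only make the recursion total)
def whileShift (fail : List Nat) (needle : List String) (tok : String) : Nat → Nat → Nat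
  | 0, v => v
  | fuel + 1, v =>
      if 0 < v ∧ tok ≠ needle.getD v "" then whileShift fail needle tok fuel (fail.getD (v - 1) 0)
      else v

-- the `for idx, tok in enumerate(haystack_tokens)` scan, carrying idx
def scanB (fail : List Nat) (needle : List String) (m : Nat) : List String → Nat → Nat → Int
  | [], _, _ => -1
  | tok :: rest, idx, j =>
      let j1 := whileShift fail needle tok j j
      let j2 := if tok = needle.getD j1 "" then j1 + 1 else j1
      if j2 = m then (idx : Int) - (m : Int) + 1
      else scanB fail needle m rest (idx + 1) j2

def find_token_subsequence_alt (haystack_tokens : List String) (needle_tokens : List String) : Int :=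
  if needle_tokens = [] then 0
  else scanB (failTable needle_tokens) needle_tokens needle_tokens.length haystack_tokens 0 0

-- ===== PRECONDITION & SPEC =====
def Spec_find_token_subsequence (haystack_tokens : List String) (needle_tokens : List String) (out : Int) : Prop := out = find_token_subsequence_alt haystack_tokens needle_tokens
instance (haystack_tokens : List String) (needle_tokens : List String) (out : Int) : Decidable (Spec_find_token_subsequence haystack_tokens needle_tokens out) := by unfold Spec_find_token_subsequence; infer_instance

-- ===== CLAIM (what is proved, stated in full; the proofs are below) =====
def Claim_equal_find_token_subsequence : Prop := ∀ (haystack_tokens : List String) (needle_tokens : List String), Dom_find_token_subsequence haystack_tokens needle_tokens → Spec_find_token_subsequence haystack_tokens needle_tokens (find_token_subsequence haystack_tokens needle_tokens)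

-- ===== LEMMAS AND PROOFS =====

-- longest border of the j-prefix of n (greatest k < j with take k n a suffix of take j n)
def bordSpec (n : List String) (j : Nat) : Nat :=
  Nat.findGreatest (fun k => n.take k <:+ n.take j) (j - 1)

-- longest prefix of n that is a suffix of pre
def muF (n pre : List String) : Nat :=
  Nat.findGreatest (fun k => n.take k <:+ pre) (min n.length pre.length)

-- ---------- generic list lemmas ----------

theorem suffix_snoc_iff (a b : List String) (x y : String) :
    (a ++ [x] <:+ b ++ [y]) ↔ (x = y ∧ a <:+ b) := by
  rw [← List.reverse_prefix]
  simp [List.cons_prefix_cons]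

theorem take_snoc (n : List String) (k : Nat) (h : k < n.length) :
    n.take (k + 1) = n.take k ++ [n[k]] := by
  rw [List.take_add_one, List.getElem?_eq_getElem h]; rfl

theorem length_take_of_le' (n : List String) (k : Nat) (h : k ≤ n.length) :
    (n.take k).length = k := by
  simp [List.length_take]; omega

theorem take_suffix_take_of_suffix (n pre : List String) (k v : Nat)
    (hk : k ≤ n.length) (hv : v ≤ n.length) (hkv : k ≤ v)
    (h1 : n.take k <:+ pre) (h2 : n.take v <:+ pre) : n.take k <:+ n.take v :=
  List.suffix_of_suffix_length_le h1 h2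
    (by rw [length_take_of_le' n k hk, length_take_of_le' n v hv]; exact hkv)

theorem window_of_prefix (pre rest : List String) (s m : Nat) (h : s + m ≤ pre.length) :
    ((pre ++ rest).drop s).take m = (pre.drop s).take m := by
  rw [List.drop_append_of_le_length (by omega),
      List.take_append_of_le_length (by simp [List.length_drop]; omega)]

-- ---------- find? over List.range ----------

theorem rangeFind_none (p : Nat → Bool) (L : Nat) (h : ∀ i, i < L → p i = false) :
    (List.range L).find? p = none := by
  rw [List.find?_eq_none]
  intro x hx
  simp [List.mem_range] at hx
  simp [h x hx]

theorem rangeFind_some (p : Nat → Bool) : ∀ (L s : Nat), s < L → p s = true →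
    (∀ i, i < s → p i = false) → (List.range L).find? p = some s := by
  intro L
  induction L generalizing p with
  | zero => intro s h; omega
  | succ K ih =>
    intro s hs hp hlo
    rw [List.range_succ_eq_map]
    cases s with
    | zero => simp [hp]
    | succ s' =>
      have h0 : p 0 = false := hlo 0 (by omega)
      rw [List.find?_cons, h0]
      simp only [List.find?_map]
      rw [ih (p ∘ Nat.succ) s' (by omega) (by simpa using hp)
        (fun i hi => by simpa using hlo (i + 1) (by omega))]
      rfl

-- ---------- find? over descList ----------

theorem descList_succ (s : Nat) : descList (s + 1) = (s + 1) :: descList s := by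
  simp [descList, List.range_succ_eq_map, List.map_map]

theorem descFind_none (p : Nat → Bool) : ∀ (s : Nat),
    (∀ k, 1 ≤ k → k ≤ s → p k = false) → (descList s).find? p = none := by
  intro s
  induction s with
  | zero => intro _; rfl
  | succ s' ih =>
    intro h
    rw [descList_succ, List.find?_cons, h (s' + 1) (by omega) (by omega)]
    exact ih (fun k h1 h2 => h k h1 (by omega))

theorem descFind_some (p : Nat → Bool) : ∀ (s g : Nat), 1 ≤ g → g ≤ s → p g = true →
    (∀ k, g < k → k ≤ s → p k = false) → (descList s).find? p = some g := by
  intro s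
  induction s with
  | zero => intro g h1 h2; omega
  | succ s' ih =>
    intro g h1 h2 hp hhi
    rw [descList_succ, List.find?_cons]
    by_cases hg : g = s' + 1
    · subst hg; simp [hp]
    · rw [hhi (s' + 1) (by omega) (by omega)]
      exact ih g h1 (by omega) hp (fun k hk1 hk2 => hhi k hk1 (by omega))

-- ---------- borderLoop / borderB = bordSpec ----------

theorem borderLoop_eq_find? (n : List String) (j : Nat) : ∀ (ks : List Nat),
    borderLoop n j ks =
      (ks.find? (fun k => decide (n.take k = (n.drop (j - k)).take k))).getD 0 := by
  intro ks
  induction ks with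
  | nil => rfl
  | cons k rest ih =>
    rw [borderLoop, List.find?_cons]
    by_cases h : n.take k = (n.drop (j - k)).take k
    · simp [h]
    · simp [h, ih]

theorem bcond_iff (n : List String) (j k : Nat) (hk : k ≤ j) (hj : j ≤ n.length) :
    (n.take k = (n.drop (j - k)).take k) ↔ n.take k <:+ n.take j := by
  rw [List.suffix_iff_eq_drop,
      length_take_of_le' n j hj, length_take_of_le' n k (le_trans hk hj),
      List.drop_take]
  have : j - (j - k) = k := by omega
  rw [this]

theorem bordSpec_le (n : List String) (j : Nat) : bordSpec n j ≤ j - 1 :=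
  Nat.findGreatest_le _

theorem bordSpec_suffix (n : List String) (j : Nat) :
    n.take (bordSpec n j) <:+ n.take j :=
  Nat.findGreatest_spec (P := fun k => n.take k <:+ n.take j) (Nat.zero_le _)
    (by simp)

theorem le_bordSpec (n : List String) (j k : Nat) (hk : k < j)
    (h : n.take k <:+ n.take j) : k ≤ bordSpec n j :=
  Nat.le_findGreatest (by omega) h

theorem borderB_eq (n : List String) (j prev : Nat) (hj1 : 1 ≤ j) (hj : j ≤ n.length)
    (hcap : bordSpec n j ≤ min (j - 1) (prev + 1)) :
    borderB n j prev = bordSpec n j := by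
  rw [borderB, borderLoop_eq_find?]
  by_cases hg : bordSpec n j = 0
  · rw [descFind_none]
    · simp [hg]
    · intro k h1 h2
      simp only [decide_eq_false_iff_not]
      intro hc
      have hkj : k < j := by omega
      have := le_bordSpec n j k hkj ((bcond_iff n j k (by omega) hj).mp hc)
      omega
  · rw [descFind_some (g := bordSpec n j)]
    · rfl
    · omega
    · exact hcap
    · have := bordSpec_le n j
      exact decide_eq_true ((bcond_iff n j (bordSpec n j) (by omega) hj).mpr
        (bordSpec_suffix n j))
    · intro k hk1 hk2
      simp only [decide_eq_false_iff_not]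
      intro hc
      have hkj : k < j := by omega
      have := le_bordSpec n j k hkj ((bcond_iff n j k (by omega) hj).mp hc)
      omega

theorem bord_succ_le (n : List String) (j : Nat) (h2 : 2 ≤ j) (hj : j ≤ n.length) :
    bordSpec n j ≤ bordSpec n (j - 1) + 1 := by
  by_cases hg : bordSpec n j = 0
  · omega
  · have hsuf := bordSpec_suffix n j
    have hle := bordSpec_le n j
    set g := bordSpec n j with hgdef
    have hg1 : g - 1 < n.length := by omega
    have hj1 : j - 1 < n.length := by omega
    have hgeq : g = (g - 1) + 1 := by omega
    have hjeq : j = (j - 1) + 1 := by omega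
    rw [hgeq, hjeq, take_snoc n (g-1) hg1, take_snoc n (j-1) hj1,
        suffix_snoc_iff] at hsuf
    have := le_bordSpec n (j - 1) (g - 1) (by omega) hsuf.2
    omega

-- ---------- the failure table ----------

theorem buildFail_eq (n : List String) : ∀ (c j prev : Nat), 1 ≤ j →
    j + c ≤ n.length + 1 → prev = bordSpec n (j - 1) →
    buildFail n prev j c = (List.range c).map (fun t => bordSpec n (j + t)) := by
  intro c
  induction c with
  | zero => intro j prev _ _ _; rfl
  | succ c' ih =>
    intro j prev hj1 hjc hprev
    have hjlen : j ≤ n.length := by omega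
    have hb : borderB n j prev = bordSpec n j := by
      apply borderB_eq n j prev hj1 hjlen
      have h1 := bordSpec_le n j
      by_cases hj2 : 2 ≤ j
      · have := bord_succ_le n j hj2 hjlen
        omega
      · have hje : j = 1 := by omega
        subst hje
        have : bordSpec n 1 = 0 := rfl
        omega
    rw [buildFail, List.range_succ_eq_map, List.map_cons]
    simp only [hb]
    refine List.cons_eq_cons.mpr ⟨by norm_num, ?_⟩
    · rw [ih (j + 1) (bordSpec n j) (by omega) (by omega) (by simp), List.map_map]
      apply List.map_congr_left
      intro t _
      simp only [Function.comp]
      congr 1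
      omega

theorem failTable_getD (n : List String) (v : Nat) (h1 : 1 ≤ v) (h2 : v ≤ n.length) :
    (failTable n).getD (v - 1) 0 = bordSpec n v := by
  rw [failTable, buildFail_eq n n.length 1 0 (by omega) (by omega) rfl]
  have hlt : v - 1 < ((List.range n.length).map (fun t => bordSpec n (1 + t))).length := by
    simp; omega
  rw [List.getD_eq_getElem _ _ hlt]
  simp only [List.getElem_map, List.getElem_range]
  congr 1
  omega

-- ---------- muF ----------

theorem muF_le_len (n pre : List String) : muF n pre ≤ n.length :=
  le_trans (Nat.findGreatest_le _) (Nat.min_le_left _ _)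

theorem muF_le_pre (n pre : List String) : muF n pre ≤ pre.length :=
  le_trans (Nat.findGreatest_le _) (Nat.min_le_right _ _)

theorem take_muF_suffix (n pre : List String) : n.take (muF n pre) <:+ pre :=
  Nat.findGreatest_spec (P := fun k => n.take k <:+ pre) (Nat.zero_le _) (by simp)

theorem le_muF (n pre : List String) (k : Nat) (hk : k ≤ n.length)
    (h : n.take k <:+ pre) : k ≤ muF n pre := by
  apply Nat.le_findGreatest _ h
  have := h.length_le
  rw [length_take_of_le' n k hk] at this
  omega

theorem muF_nil (n : List String) : muF n [] = 0 := by
  simp [muF]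

-- ---------- the while loop ----------

theorem while_spec (n pre : List String) (tok : String) : ∀ (fuel v : Nat),
    v ≤ fuel → v < n.length → n.take v <:+ pre →
    (∀ k, k < n.length → n.take k <:+ pre → n.getD k "" = tok → k ≤ v) →
    (whileShift (failTable n) n tok fuel v < n.length ∧
     n.take (whileShift (failTable n) n tok fuel v) <:+ pre ∧
     (∀ k, k < n.length → n.take k <:+ pre → n.getD k "" = tok →
        k ≤ whileShift (failTable n) n tok fuel v) ∧
     (whileShift (failTable n) n tok fuel v = 0 ∨
      n.getD (whileShift (failTable n) n tok fuel v) "" = tok)) := by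
  intro fuel
  induction fuel with
  | zero =>
    intro v hv hlen hsuf hub
    have : v = 0 := by omega
    subst this
    exact ⟨hlen, hsuf, hub, Or.inl rfl⟩
  | succ f ih =>
    intro v hv hlen hsuf hub
    rw [whileShift]
    by_cases hc : 0 < v ∧ tok ≠ n.getD v ""
    · rw [if_pos hc]
      have hfail : (failTable n).getD (v - 1) 0 = bordSpec n v :=
        failTable_getD n v (by omega) (by omega)
      rw [hfail]
      have hblt : bordSpec n v < v := by have := bordSpec_le n v; omega
      apply ih (bordSpec n v) (by omega) (by omega)
        ((bordSpec_suffix n v).trans hsuf)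
      intro k hklen hksuf hktok
      have hkv : k ≤ v := hub k hklen hksuf hktok
      have hkne : k ≠ v := by
        intro he; subst he; exact hc.2 hktok.symm
      exact le_bordSpec n v k (by omega)
        (take_suffix_take_of_suffix n pre k v (by omega) (by omega) (by omega)
          hksuf hsuf)
    · rw [if_neg hc]
      push_neg at hc
      refine ⟨hlen, hsuf, hub, ?_⟩
      by_cases hv0 : v = 0
      · exact Or.inl hv0
      · exact Or.inr (hc (by omega)).symm

-- ---------- one scan step computes muF of the extended prefix ----------

theorem ok_snoc (n pre : List String) (tok : String) (t : Nat) (ht : t < n.length) :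
    (n.take (t + 1) <:+ pre ++ [tok]) ↔ (n.take t <:+ pre ∧ n.getD t "" = tok) := by
  rw [take_snoc n t ht, suffix_snoc_iff, List.getD_eq_getElem _ _ ht]
  tauto

theorem step_mu (n pre : List String) (tok : String) (hj : muF n pre < n.length) :
    (if tok = n.getD (whileShift (failTable n) n tok (muF n pre) (muF n pre)) ""
     then whileShift (failTable n) n tok (muF n pre) (muF n pre) + 1
     else whileShift (failTable n) n tok (muF n pre) (muF n pre)) =
    muF n (pre ++ [tok]) := by
  obtain ⟨hrlen, hrsuf, hrub, hrexit⟩ :=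
    while_spec n pre tok (muF n pre) (muF n pre) le_rfl hj (take_muF_suffix n pre)
      (fun k hk hsuf _ => le_muF n pre k (by omega) hsuf)
  set r := whileShift (failTable n) n tok (muF n pre) (muF n pre) with hrdef
  have hbound : min n.length (pre ++ [tok]).length = min n.length (pre.length + 1) := by
    simp
  by_cases htok : tok = n.getD r ""
  · rw [if_pos htok]
    symm
    apply (Nat.findGreatest_eq_iff).mpr
    refine ⟨?_, ?_, ?_⟩
    · rw [hbound]
      have : r ≤ pre.length := by
        have := hrsuf.length_le
        rw [length_take_of_le' n r (by omega)] at this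
        omega
      omega
    · intro _
      exact (ok_snoc n pre tok r hrlen).mpr ⟨hrsuf, htok.symm⟩
    · intro k hk hkb hksuf
      rw [hbound] at hkb
      obtain ⟨t, rfl⟩ : ∃ t, k = t + 1 := ⟨k - 1, by omega⟩
      obtain ⟨h1, h2⟩ := (ok_snoc n pre tok t (by omega)).mp hksuf
      have := hrub t (by omega) h1 h2
      omega
  · rw [if_neg htok]
    have hr0 : r = 0 := by
      rcases hrexit with h | h
      · exact h
      · exact absurd h.symm htok
    rw [hr0]
    symm
    apply (Nat.findGreatest_eq_iff).mpr
    refine ⟨by omega, by omega, ?_⟩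
    intro k hk hkb hksuf
    rw [hbound] at hkb
    obtain ⟨t, rfl⟩ : ∃ t, k = t + 1 := ⟨k - 1, by omega⟩
    obtain ⟨h1, h2⟩ := (ok_snoc n pre tok t (by omega)).mp hksuf
    have := hrub t (by omega) h1 h2
    have ht0 : t = 0 := by omega
    subst ht0
    rw [hr0] at htok
    exact htok h2.symm

-- ---------- the scan ----------

theorem scanB_spec (h n : List String) : ∀ (rest pre : List String),
    pre ++ rest = h → muF n pre < n.length →
    (∀ s, s + n.length ≤ pre.length → ¬ ((h.drop s).take n.length = n)) →
    scanB (failTable n) n n.length rest pre.length (muF n pre) =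
      (match (List.range (h.length + 1 - n.length)).find?
          (fun i => decide ((h.drop i).take n.length = n)) with
       | none => -1
       | some i => (i : Int)) := by
  intro rest
  induction rest with
  | nil =>
    intro pre hpre hmu hinv
    rw [rangeFind_none]
    · rfl
    · intro i hi
      simp only [decide_eq_false_iff_not]
      apply hinv
      have : pre.length = h.length := by rw [← hpre]; simp
      omega
  | cons tok rest' ih =>
    intro pre hpre hmu hinv
    have hpre' : (pre ++ [tok]) ++ rest' = h := by
      rw [← hpre]; simp
    rw [scanB]
    have hstep := step_mu n pre tok hmu
    rw [hstep]
    have hmule := muF_le_len n (pre ++ [tok])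
    have hmulepre := muF_le_pre n (pre ++ [tok])
    by_cases hfull : muF n (pre ++ [tok]) = n.length
    · rw [if_pos hfull]
      have hlenpre' : (pre ++ [tok]).length = pre.length + 1 := by simp
      have hnle : n.length ≤ pre.length + 1 := by
        rw [hfull] at hmulepre; omega
      have hsufn : n <:+ pre ++ [tok] := by
        have := take_muF_suffix n (pre ++ [tok])
        rwa [hfull, List.take_length] at this
      have hn1 : 1 ≤ n.length := by
        by_contra hc
        have hn0 : n.length = 0 := by omega
        have hmu0 : muF n pre ≤ 0 := by have := muF_le_len n pre; omega
        omega
      obtain ⟨s, hsdef⟩ : ∃ s, s = pre.length + 1 - n.length := ⟨_, rfl⟩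
      have hcond : ((h.drop s).take n.length = n) := by
        rw [← hpre', window_of_prefix _ _ _ _ (by simp; omega)]
        have hdroplen : ((pre ++ [tok]).drop s).length = n.length := by
          simp; omega
        have : n = (pre ++ [tok]).drop s := by
          have h2 := List.suffix_iff_eq_drop.mp hsufn
          rw [hlenpre'] at h2
          rw [hsdef]
          exact h2
        rw [List.take_of_length_le (by omega), ← this]
      have hhlen : pre.length + 1 ≤ h.length := by
        rw [← hpre']; simp
      rw [rangeFind_some _ _ s (by omega) (by simpa using hcond)]
      · push_cast
        omega
      · intro i hi
        simp only [decide_eq_false_iff_not]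
        apply hinv
        omega
    · rw [if_neg hfull]
      have : pre.length + 1 = (pre ++ [tok]).length := by simp
      rw [this]
      apply ih (pre ++ [tok]) hpre' (by omega)
      intro s hs
      simp only [List.length_append, List.length_cons, List.length_nil] at hs
      by_cases hsold : s + n.length ≤ pre.length
      · exact hinv s hsold
      · have hseq : s + n.length = pre.length + 1 := by simp at hs; omega
        intro hc
        have hwin : ((pre ++ [tok]).drop s).take n.length = n := by
          rw [← window_of_prefix (pre ++ [tok]) rest' s n.length (by simp; omega), hpre']
          exact hc
        have hdroplen : ((pre ++ [tok]).drop s).length = n.length := by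
          simp; omega
        rw [List.take_of_length_le (by omega)] at hwin
        have hsuf : n <:+ pre ++ [tok] := hwin ▸ List.drop_suffix s (pre ++ [tok])
        have := le_muF n (pre ++ [tok]) n.length le_rfl (by simpa [List.take_length] using hsuf)
        omega

-- ---------- A's loop ----------

theorem goA_eq (h n : List String) : ∀ (ks : List Nat),
    goA h n (ks.map (Nat.cast : Nat → Int)) =
      (match ks.find? (fun i => decide ((h.drop i).take n.length = n)) with
       | none => -1
       | some i => (i : Int)) := by
  intro ks
  induction ks with
  | nil => rfl
  | cons i rest ih =>
    rw [List.map_cons, goA, List.find?_cons]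
    have hslice : PySem.List.slice h (some (i : Int)) (some ((i : Int) + (n.length : Int))) =
        (h.drop i).take n.length := PySem.List.slice_natCast_add h i n.length
    rw [hslice]
    by_cases hc : (h.drop i).take n.length = n
    · simp [hc]
    · simp only [hc, decide_false]
      exact ih

-- ===== VERDICT (by name: the statement is the Claim_ definition above) =====
theorem find_token_subsequence_spec : Claim_equal_find_token_subsequence := by
  intro h n _
  unfold Spec_find_token_subsequence find_token_subsequence find_token_subsequence_alt
  by_cases hn : n = []
  · simp [hn]
  · rw [if_neg hn, if_neg hn]
    have hn1 : 1 ≤ n.length := by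
      cases n with
      | nil => exact absurd rfl hn
      | cons a l => simp
    have hrange : PySem.List.pyRange 0 ((h.length : Int) - (n.length : Int) + 1) 1 =
        (List.range (h.length + 1 - n.length)).map (Nat.cast : Nat → Int) := by
      rw [PySem.List.pyRange_one]
      have : (((h.length : Int) - (n.length : Int) + 1) - 0).toNat = h.length + 1 - n.length := by
        omega
      rw [this]
      apply List.map_congr_left
      intro t _
      omega
    rw [hrange, goA_eq]
    have hscan := scanB_spec h n h [] (by simp) (by rw [muF_nil]; omega)
      (by intro s hs; exfalso; simp only [List.length_nil, Nat.le_zero] at hs; omega)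
    rw [muF_nil] at hscan
    simpa using hscan.symm
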